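-- pv_equiv track=rewrite | github.com/Ivansap/dodobuster | dodo.py | game_field
-- ===== SOURCE A (Python) =====
-- def game_field(img_field):
--     s = []
--     field = []
--     for line in img_field:
--         row = []
--         for pixel in line:
--             if pixel not in s:
--                 s.append(pixel)
--             row.append(s.index(pixel))
--
--         field.append(row)
--     return field
-- ===== SOURCE B (Python) =====
-- def game_field(img_field):
--     # Flatten; a reverse sweep with overwriting records each pixel's FIRST global
--     # position; sorting those positions gives the dense labels by rank.
--     flat = [tuple(p) for line in img_field for p in line]
--     first = {}
--     for i in range(len(flat) - 1, -1, -1):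
--         first[flat[i]] = i          # overwrite: the surviving value is the first occurrence
--     order = sorted(first.values())
--     rank = {pos: lab for lab, pos in enumerate(order)}
--     return [[rank[first[tuple(p)]] for p in line] for line in img_field]
-- ===== Notes on version B (the rewrite author's own statement) =====
-- stated objective: faster
-- what changed: Flatten the grid, record each pixel's first global position by a single reverse sweep with dict overwriting, sort those positions and rank them, then emit labels by rank lookup - replacing A's interleaved per-pixel membership test and s.index scan.
import Mathlib
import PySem

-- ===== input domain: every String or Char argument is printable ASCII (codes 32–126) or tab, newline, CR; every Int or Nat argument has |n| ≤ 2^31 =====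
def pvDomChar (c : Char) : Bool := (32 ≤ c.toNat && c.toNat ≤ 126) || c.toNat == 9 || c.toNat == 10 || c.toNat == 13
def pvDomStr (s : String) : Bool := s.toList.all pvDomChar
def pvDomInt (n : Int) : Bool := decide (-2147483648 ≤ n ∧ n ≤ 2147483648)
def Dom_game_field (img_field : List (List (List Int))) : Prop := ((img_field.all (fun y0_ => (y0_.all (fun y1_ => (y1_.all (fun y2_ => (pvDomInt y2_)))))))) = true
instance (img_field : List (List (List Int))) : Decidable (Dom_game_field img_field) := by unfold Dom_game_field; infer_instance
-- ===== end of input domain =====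

-- B replaces A's interleaved seen-list scan (membership test + s.index per pixel) by a
-- flatten / reverse-sweep-for-first-positions / sort-and-rank pipeline (objective: faster).

-- ===== PORT A =====
-- inner loop over one line: state is (s, row); 'if pixel not in s: s.append(pixel)'
-- then 'row.append(s.index(pixel))' (the index always exists; getD 0 is unreachable)
def gfPixels (s : List (List Int)) (line : List (List Int)) :
    List (List Int) × List Int :=
  match line with
  | [] => (s, [])
  | p :: rest =>
    let s' := if p ∈ s then s else s ++ [p]
    let r := gfPixels s' rest
    (r.1, (((PySem.List.index? s' p).getD 0 : Nat) : Int) :: r.2)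

-- outer loop: 'for line in img_field: … field.append(row)'
def gfLines (s : List (List Int)) (lines : List (List (List Int))) : List (List Int) :=
  match lines with
  | [] => []
  | line :: rest =>
    let r := gfPixels s line
    r.2 :: gfLines r.1 rest

def game_field (img_field : List (List (List Int))) : List (List Int) :=
  gfLines [] img_field

-- ===== PORT B =====
-- 'flat = [tuple(p) for line in img_field for p in line]' (tuple(p) is the pixel value itself
-- under the type convention; tuple() only makes it hashable in Python)
def gfFlat (img_field : List (List (List Int))) : List (List Int) :=
  img_field.flatMap (fun line => line.map (fun p => p))

-- 'for i in range(len(flat)-1, -1, -1): first[flat[i]] = i'  (flat[i] is in range; getD [] unreachable)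
def gfFirst (flat : List (List Int)) : PySem.Dict (List Int) Int :=
  (PySem.List.pyRange ((flat.length : Int) - 1) (-1) (-1)).foldl
    (fun d i => d.insert (PySem.List.pyGetD flat i []) i) PySem.Dict.empty

-- 'rank = {pos: lab for lab, pos in enumerate(order)}'
def gfRank (order : List Int) : PySem.Dict Int Int :=
  (PySem.List.enumerate order 0).foldl (fun d q => d.insert q.2 q.1) PySem.Dict.empty

-- 'rank[first[tuple(p)]]': both lookups always hit; the getD defaults are unreachable
def game_field_alt (img_field : List (List (List Int))) : List (List Int) :=
  let flat := gfFlat img_field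
  let first := gfFirst flat
  let order := PySem.List.sorted first.values (fun x => x) false
  let rank := gfRank order
  img_field.map (fun line => line.map (fun p => rank.getD (first.getD p 0) 0))

-- ===== PRECONDITION & SPEC =====
def Spec_game_field (img_field : List (List (List Int))) (out : List (List Int)) : Prop := out = game_field_alt img_field
instance (img_field : List (List (List Int))) (out : List (List Int)) : Decidable (Spec_game_field img_field out) := by unfold Spec_game_field; infer_instance

-- ===== CLAIM (what is proved, stated in full; the proofs are below) =====
def Claim_equal_game_field : Prop := ∀ (img_field : List (List (List Int))), Dom_game_field img_field → Spec_game_field img_field (game_field img_field)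

-- ===== LEMMAS AND PROOFS =====

-- ---------- A-side: the loop produces, per pixel, the index into the final seen-list ----------

def gfSAdd (s : List (List Int)) (p : List Int) : List (List Int) :=
  if p ∈ s then s else s ++ [p]

def gfIdx (s : List (List Int)) (p : List Int) : Int :=
  (((PySem.List.index? s p).getD 0 : Nat) : Int)

theorem gfPixels_fst (line : List (List Int)) : ∀ s,
    (gfPixels s line).1 = line.foldl gfSAdd s := by
  induction line with
  | nil => intro s; rfl
  | cons p rest ih =>
    intro s
    simp [gfPixels, gfSAdd, List.foldl, ih]

theorem gfSAdd_prefix (s : List (List Int)) (p : List Int) : s <+: gfSAdd s p := by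
  unfold gfSAdd
  split
  · exact List.prefix_refl s
  · exact ⟨[p], rfl⟩

theorem gfSFold_prefix (line : List (List Int)) : ∀ s, s <+: line.foldl gfSAdd s := by
  induction line with
  | nil => intro s; exact List.prefix_refl s
  | cons p rest ih =>
    intro s
    exact (gfSAdd_prefix s p).trans (ih (gfSAdd s p))

theorem gfSFoldLines_prefix (lines : List (List (List Int))) : ∀ s,
    s <+: lines.foldl (fun s line => line.foldl gfSAdd s) s := by
  induction lines with
  | nil => intro s; exact List.prefix_refl s
  | cons line rest ih =>
    intro s
    exact (gfSFold_prefix line s).trans (ih _)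

theorem index?_stable (s t : List (List Int)) (p : List Int) (hp : p ∈ s)
    (hpre : s <+: t) : PySem.List.index? t p = PySem.List.index? s p := by
  obtain ⟨u, rfl⟩ := hpre
  exact PySem.List.index?_append_of_mem u hp

theorem mem_gfSAdd_self (s : List (List Int)) (p : List Int) : p ∈ gfSAdd s p := by
  unfold gfSAdd
  split
  · assumption
  · simp

theorem gfPixels_snd (line : List (List Int)) : ∀ s t, (line.foldl gfSAdd s) <+: t →
    (gfPixels s line).2 = line.map (fun p => gfIdx t p) := by
  induction line with
  | nil => intro s t _; rfl
  | cons p rest ih =>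
    intro s t ht
    have hfold : (p :: rest).foldl gfSAdd s = rest.foldl gfSAdd (gfSAdd s p) := rfl
    rw [hfold] at ht
    have hstep : (gfSAdd s p) <+: t := (gfSFold_prefix rest (gfSAdd s p)).trans ht
    have hidx : PySem.List.index? t p = PySem.List.index? (gfSAdd s p) p :=
      index?_stable _ _ _ (mem_gfSAdd_self s p) hstep
    show (((PySem.List.index? (gfSAdd s p) p).getD 0 : Nat) : Int) :: (gfPixels (gfSAdd s p) rest).2
        = List.map (fun p => gfIdx t p) (p :: rest)
    rw [List.map_cons]
    refine congrArg₂ List.cons ?_ (ih (gfSAdd s p) t ht)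
    rw [gfIdx, hidx]

theorem gfLines_eq (lines : List (List (List Int))) : ∀ s t,
    (lines.foldl (fun s line => line.foldl gfSAdd s) s) <+: t →
    gfLines s lines = lines.map (fun line => line.map (fun p => gfIdx t p)) := by
  induction lines with
  | nil => intro s t _; rfl
  | cons line rest ih =>
    intro s t ht
    have hfold : (line :: rest).foldl (fun s l => l.foldl gfSAdd s) s
        = rest.foldl (fun s l => l.foldl gfSAdd s) (line.foldl gfSAdd s) := rfl
    rw [hfold] at ht
    have h1 : (line.foldl gfSAdd s) <+: t := (gfSFoldLines_prefix rest _).trans ht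
    show (gfPixels s line).2 :: gfLines (gfPixels s line).1 rest
        = List.map (fun line => List.map (fun p => gfIdx t p) line) (line :: rest)
    rw [List.map_cons, gfPixels_fst]
    exact congrArg₂ List.cons (gfPixels_snd line s t h1) (ih _ t ht)

-- ---------- first-occurrence dedup, and A's seen-list is exactly it ----------

-- fuel-based first-occurrence dedup (fuel ≥ length makes it total)
def gfFAux : Nat → List (List Int) → List (List Int)
  | _, [] => []
  | 0, _ :: _ => []
  | n+1, x :: t => x :: gfFAux n (t.filter (fun y => decide (y ≠ x)))

theorem gfFAux_congr : ∀ (n m : Nat) (xs : List (List Int)), xs.length ≤ n → xs.length ≤ m →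
    gfFAux n xs = gfFAux m xs := by
  intro n
  induction n with
  | zero =>
    intro m xs h1 _
    cases xs with
    | nil => cases m <;> rfl
    | cons x t => simp at h1
  | succ n ih =>
    intro m xs h1 h2
    cases xs with
    | nil => cases m <;> rfl
    | cons x t =>
      cases m with
      | zero => simp at h2
      | succ m =>
        simp only [gfFAux]
        congr 1
        apply ih
        · exact le_trans (List.length_filter_le _ t) (by simpa using h1)
        · exact le_trans (List.length_filter_le _ t) (by simpa using h2)

def gfF (xs : List (List Int)) : List (List Int) := gfFAux xs.length xs

theorem gfF_nil : gfF [] = [] := rfl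

theorem gfF_cons (x : List Int) (t : List (List Int)) :
    gfF (x :: t) = x :: gfF (t.filter (fun y => decide (y ≠ x))) := by
  simp only [gfF, List.length_cons, gfFAux]
  congr 1
  exact gfFAux_congr _ _ _ (List.length_filter_le _ t) (le_refl _)

theorem gfFAux_sublist : ∀ (n : Nat) (xs : List (List Int)), xs.length ≤ n →
    (gfFAux n xs).Sublist xs := by
  intro n
  induction n with
  | zero =>
    intro xs h1
    cases xs with
    | nil => simp [gfFAux]
    | cons x t => simp at h1
  | succ n ih =>
    intro xs h1
    cases xs with
    | nil => simp [gfFAux]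
    | cons x t =>
      simp only [gfFAux]
      exact ((ih _ (le_trans (List.length_filter_le _ t) (by simpa using h1))).trans
        List.filter_sublist).cons₂ x

theorem gfFAux_mem : ∀ (n : Nat) (xs : List (List Int)) (a : List Int), xs.length ≤ n →
    (a ∈ gfFAux n xs ↔ a ∈ xs) := by
  intro n
  induction n with
  | zero =>
    intro xs a h1
    cases xs with
    | nil => simp [gfFAux]
    | cons x t => simp at h1
  | succ n ih =>
    intro xs a h1
    cases xs with
    | nil => simp [gfFAux]
    | cons x t =>
      simp only [gfFAux, List.mem_cons]
      by_cases hax : a = x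
      · simp [hax]
      · rw [ih _ a (le_trans (List.length_filter_le _ t) (by simpa using h1))]
        simp [List.mem_filter, hax]

theorem gfF_mem (xs : List (List Int)) (a : List Int) : a ∈ gfF xs ↔ a ∈ xs :=
  gfFAux_mem _ _ _ (le_refl _)

theorem foldl_gfSAdd_eq (xs : List (List Int)) : ∀ acc,
    xs.foldl gfSAdd acc = acc ++ gfF (xs.filter (fun x => decide (x ∉ acc))) := by
  induction xs with
  | nil => intro acc; simp [gfF_nil]
  | cons x t ih =>
    intro acc
    by_cases hx : x ∈ acc
    · have hstep : gfSAdd acc x = acc := by simp [gfSAdd, hx]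
      simp only [List.foldl_cons, hstep, ih, List.filter_cons]
      simp [hx]
    · have hstep : gfSAdd acc x = acc ++ [x] := by simp [gfSAdd, hx]
      have hfilter : t.filter (fun y => decide (y ∉ acc ++ [x]))
          = (t.filter (fun y => decide (y ∉ acc))).filter (fun y => decide (y ≠ x)) := by
        rw [List.filter_filter]
        apply List.filter_congr
        intro y _
        by_cases h1 : y ∈ acc <;> by_cases h2 : y = x <;> simp [h1, h2]
      simp only [List.foldl_cons, hstep, ih, List.filter_cons]
      simp only [hx, not_false_eq_true, decide_true, if_pos]
      rw [hfilter, gfF_cons, List.append_assoc, List.singleton_append]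

-- ---------- index bookkeeping (gfPos l a = position of the first occurrence of a in l) ----------

def gfPos {α : Type} [DecidableEq α] : List α → α → Nat
  | [], _ => 0
  | x :: t, a => if x = a then 0 else gfPos t a + 1

theorem index?_eq_of_mem {α : Type} [DecidableEq α] [BEq α] [LawfulBEq α]
    (l : List α) (p : α) (h : p ∈ l) :
    PySem.List.index? l p = some (gfPos l p) := by
  induction l with
  | nil => cases h
  | cons a t ih =>
    by_cases hap : a = p
    · subst hap
      rw [PySem.List.index?_cons_self]
      simp [gfPos]
    · have hpt : p ∈ t := by
        cases h with
        | head => exact absurd rfl hap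
        | tail _ h => exact h
      rw [PySem.List.index?_cons_of_ne t hap, ih hpt]
      simp [gfPos, hap]

theorem gfPos_filter_lt {α : Type} [DecidableEq α] (l : List α) (q : α → Bool) :
    ∀ a b, a ∈ l.filter q → b ∈ l.filter q →
    gfPos (l.filter q) a < gfPos (l.filter q) b → gfPos l a < gfPos l b := by
  induction l with
  | nil => intro a b ha; simp at ha
  | cons x t ih =>
    intro a b ha hb hlt
    by_cases hx : q x
    · rw [List.filter_cons_of_pos hx] at ha hb hlt
      by_cases hax : x = a
      · subst hax
        have hbx : x ≠ b := by
          intro h; subst h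
          simp [gfPos] at hlt
        simp [gfPos, hbx]
      · have hbx : x ≠ b := by
          intro h; subst h
          simp [gfPos] at hlt
        simp only [gfPos] at hlt ⊢
        rw [if_neg hax, if_neg hbx] at hlt ⊢
        have ha' : a ∈ t.filter q := by
          cases ha with
          | head => exact absurd rfl hax
          | tail _ h => exact h
        have hb' : b ∈ t.filter q := by
          cases hb with
          | head => exact absurd rfl hbx
          | tail _ h => exact h
        have := ih a b ha' hb' (by omega)
        omega
    · rw [List.filter_cons_of_neg hx] at ha hb hlt
      have hax : x ≠ a := by
        intro h; subst h
        have := (List.mem_filter.mp ha).2; simp [hx] at this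
      have hbx : x ≠ b := by
        intro h; subst h
        have := (List.mem_filter.mp hb).2; simp [hx] at this
      simp only [gfPos]
      rw [if_neg hax, if_neg hbx]
      have := ih a b ha hb hlt
      omega

theorem gfFAux_pairwise : ∀ (n : Nat) (xs : List (List Int)), xs.length ≤ n →
    (gfFAux n xs).Pairwise (fun a b => gfPos xs a < gfPos xs b) := by
  intro n
  induction n with
  | zero =>
    intro xs h1
    cases xs with
    | nil => simp [gfFAux]
    | cons x t => simp at h1
  | succ n ih =>
    intro xs h1
    cases xs with
    | nil => simp [gfFAux]
    | cons x t =>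
      simp only [gfFAux]
      have hlen : (t.filter (fun y => decide (y ≠ x))).length ≤ n :=
        le_trans (List.length_filter_le _ t) (by simpa using h1)
      refine List.Pairwise.cons ?_ ?_
      · intro b hb
        have hbf : b ∈ t.filter (fun y => decide (y ≠ x)) :=
          (gfFAux_sublist n _ hlen).mem hb
        have hbx : x ≠ b := by
          have := (List.mem_filter.mp hbf).2
          simp at this
          exact fun h => this h.symm
        simp [gfPos, hbx]
      · refine (ih _ hlen).imp_of_mem ?_
        intro a b ha hb hlt
        have ha' : a ∈ t.filter (fun y => decide (y ≠ x)) :=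
          (gfFAux_sublist n _ hlen).mem ha
        have hb' : b ∈ t.filter (fun y => decide (y ≠ x)) :=
          (gfFAux_sublist n _ hlen).mem hb
        have hax : x ≠ a := by
          have := (List.mem_filter.mp ha').2; simp at this
          exact fun h => this h.symm
        have hbx : x ≠ b := by
          have := (List.mem_filter.mp hb').2; simp at this
          exact fun h => this h.symm
        have := gfPos_filter_lt t (fun y => decide (y ≠ x)) a b ha' hb' hlt
        simp only [gfPos]
        rw [if_neg hax, if_neg hbx]
        omega

theorem gfF_pairwise (xs : List (List Int)) :
    (gfF xs).Pairwise (fun a b => gfPos xs a < gfPos xs b) :=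
  gfFAux_pairwise _ _ (le_refl _)

theorem gfF_nodup (xs : List (List Int)) : (gfF xs).Nodup :=
  (gfF_pairwise xs).imp (fun h => by intro he; subst he; exact lt_irrefl _ h)

theorem gfPos_map_pairwise (g : List Int → Int) (s : List (List Int)) (p : List Int)
    (hpw : s.Pairwise (fun a b => g a < g b)) (hp : p ∈ s) :
    gfPos (s.map g) (g p) = gfPos s p := by
  induction s with
  | nil => cases hp
  | cons a t ih =>
    rcases List.pairwise_cons.mp hpw with ⟨hhead, htail⟩
    by_cases hpa : a = p
    · subst hpa
      simp [gfPos]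
    · have hpt : p ∈ t := by
        cases hp with
        | head => exact absurd rfl hpa
        | tail _ h => exact h
      have hgne : g a ≠ g p := ne_of_lt (hhead p hpt)
      rw [List.map_cons]
      simp only [gfPos, if_neg hpa, if_neg hgne]
      rw [ih htail hpt]

-- ---------- B-side: the first-occurrence dict ----------

theorem gfFirst_eq_foldr (flat : List (List Int)) :
    gfFirst flat = (PySem.List.enumerate flat 0).foldr
      (fun q d => d.insert q.2 q.1) PySem.Dict.empty := by
  unfold gfFirst
  have h1 : PySem.List.pyRange ((flat.length : Int) - 1) (-1) (-1)
      = (PySem.List.pyRange 0 (flat.length : Int) 1).reverse := by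
    rw [PySem.List.pyRange_neg_one_eq_reverse]
    norm_num
  rw [h1, List.foldl_reverse]
  have h2 : PySem.List.enumerate flat 0
      = (PySem.List.pyRange 0 (flat.length : Int) 1).map
          (fun j => (j, PySem.List.pyGetD flat j ([] : List Int))) := by
    simpa using PySem.List.enumerate_eq_map_pyRange ([] : List Int) (xs := flat)
  rw [h2, List.foldr_map]

theorem gfFirst_get? (xs : List (List Int)) : ∀ (s : Int) (d : PySem.Dict (List Int) Int)
    (p : List Int),
    ((PySem.List.enumerate xs s).foldr (fun q d => d.insert q.2 q.1) d).get? p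
      = if p ∈ xs then some (s + (gfPos xs p : Int)) else d.get? p := by
  induction xs with
  | nil => intro s d p; simp [PySem.List.enumerate_nil]
  | cons x t ih =>
    intro s d p
    rw [PySem.List.enumerate_cons, List.foldr_cons]
    by_cases hpx : p = x
    · subst hpx
      rw [PySem.Dict.get?_insert_self]
      simp [gfPos]
    · rw [PySem.Dict.get?_insert_of_ne _ _ hpx, ih (s + 1) d p]
      by_cases hpt : p ∈ t
      · have hmem : p ∈ x :: t := List.mem_cons_of_mem x hpt
        have hxp : x ≠ p := fun h => hpx h.symm
        rw [if_pos hpt, if_pos hmem]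
        simp only [gfPos]
        rw [if_neg hxp]
        congr 1
        push_cast
        ring
      · have hnot : p ∉ x :: t := by
          intro h; cases h with
          | head => exact hpx rfl
          | tail _ h => exact hpt h
        rw [if_neg hpt, if_neg hnot]

theorem gfFirst_getD (flat : List (List Int)) (p : List Int) (hp : p ∈ flat) :
    (gfFirst flat).getD p 0 = (gfPos flat p : Int) := by
  rw [PySem.Dict.getD_eq_get?_getD, gfFirst_eq_foldr, gfFirst_get?, if_pos hp]
  simp

theorem gfFirst_keys (flat : List (List Int)) :
    (gfFirst flat).keys = PySem.Set.ofList flat.reverse := by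
  unfold gfFirst
  rw [PySem.Dict.keys_foldl_insert_key
    (key := fun i => PySem.List.pyGetD flat i ([] : List Int)) (f := fun _ i => i)]
  have h1 : PySem.List.pyRange ((flat.length : Int) - 1) (-1) (-1)
      = (PySem.List.pyRange 0 (flat.length : Int) 1).reverse := by
    rw [PySem.List.pyRange_neg_one_eq_reverse]
    norm_num
  rw [h1, List.map_reverse]
  rw [PySem.List.map_pyGetD_pyRange_zero' flat ([] : List Int)]
  rfl

-- ---------- B-side: sorted first positions and the rank dict ----------

theorem gfOrder_eq (flat : List (List Int)) :
    PySem.List.sorted (gfFirst flat).values (fun x => x) false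
      = (gfF flat).map (fun a => (gfPos flat a : Int)) := by
  have hkeysnd : (gfFirst flat).keys.Nodup := by
    rw [gfFirst_keys]; exact PySem.Set.nodup_ofList _
  have hvals : (gfFirst flat).values
      = (gfFirst flat).keys.map (fun k => (gfFirst flat).getD k 0) :=
    PySem.Dict.values_eq_map_keys _ hkeysnd 0
  have hkeysperm : (gfFirst flat).keys.Perm (gfF flat) := by
    rw [gfFirst_keys]
    refine (List.perm_ext_iff_of_nodup (PySem.Set.nodup_ofList _) (gfF_nodup flat)).mpr ?_
    intro a
    rw [PySem.Set.mem_ofList, List.mem_reverse, gfF_mem]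
  have hmapeq : (gfFirst flat).keys.map (fun k => (gfFirst flat).getD k 0)
      = (gfFirst flat).keys.map (fun k => (gfPos flat k : Int)) := by
    apply List.map_congr_left
    intro k hk
    apply gfFirst_getD
    have : k ∈ PySem.Set.ofList flat.reverse := by rw [← gfFirst_keys]; exact hk
    rw [PySem.Set.mem_ofList, List.mem_reverse] at this
    exact this
  have hperm : ((gfF flat).map (fun a => (gfPos flat a : Int))).Perm (gfFirst flat).values := by
    rw [hvals, hmapeq]
    exact (hkeysperm.map _).symm
  apply PySem.List.sorted_eq_of_perm_of_pairwise_lt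
  · exact hperm
  · refine (List.pairwise_map).mpr ?_
    refine (gfF_pairwise flat).imp ?_
    intro h
    simpa using h

theorem gfRank_get? (ys : List Int) : ∀ (s : Int) (d : PySem.Dict Int Int) (p : Int),
    ys.Nodup →
    ((PySem.List.enumerate ys s).foldl (fun d q => d.insert q.2 q.1) d).get? p
      = if p ∈ ys then some (s + (gfPos ys p : Int)) else d.get? p := by
  induction ys with
  | nil => intro s d p _; simp [PySem.List.enumerate_nil]
  | cons y t ih =>
    intro s d p hnd
    rcases List.nodup_cons.mp hnd with ⟨hyt, hndt⟩
    rw [PySem.List.enumerate_cons, List.foldl_cons, ih (s + 1) _ p hndt]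
    by_cases hpy : p = y
    · subst hpy
      rw [if_neg hyt, if_pos List.mem_cons_self, PySem.Dict.get?_insert_self]
      simp [gfPos]
    · have hyp : y ≠ p := fun h => hpy h.symm
      by_cases hpt : p ∈ t
      · rw [if_pos hpt, if_pos (List.mem_cons_of_mem y hpt)]
        simp only [gfPos]
        rw [if_neg hyp]
        congr 1
        push_cast
        ring
      · have hnot : p ∉ y :: t := by
          intro h; cases h with
          | head => exact hpy rfl
          | tail _ h => exact hpt h
        rw [if_neg hpt, if_neg hnot, PySem.Dict.get?_insert_of_ne _ _ hpy]

-- ---------- assembly ----------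

theorem gfFlat_eq (img_field : List (List (List Int))) :
    gfFlat img_field = img_field.flatten := by
  unfold gfFlat
  simp

theorem foldl_flatten_gfSAdd (ls : List (List (List Int))) : ∀ s,
    (ls.flatten).foldl gfSAdd s = ls.foldl (fun s l => l.foldl gfSAdd s) s := by
  induction ls with
  | nil => intro s; rfl
  | cons l rest ih =>
    intro s
    rw [List.flatten_cons, List.foldl_append, List.foldl_cons, ih]

theorem seen_eq_gfF (img_field : List (List (List Int))) :
    img_field.foldl (fun s line => line.foldl gfSAdd s) []
      = gfF (gfFlat img_field) := by
  rw [gfFlat_eq, ← foldl_flatten_gfSAdd, foldl_gfSAdd_eq]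
  have hfl : img_field.flatten.filter (fun x => decide (x ∉ ([] : List (List Int))))
      = img_field.flatten := by
    apply List.filter_eq_self.mpr
    intro a _
    simp
  rw [hfl, List.nil_append]

theorem pixel_value_eq (flat : List (List Int)) (p : List Int) (hp : p ∈ flat) :
    (gfRank (PySem.List.sorted (gfFirst flat).values (fun x => x) false)).getD
        ((gfFirst flat).getD p 0) 0
      = gfIdx (gfF flat) p := by
  have hpF : p ∈ gfF flat := (gfF_mem flat p).mpr hp
  have hgpw : (gfF flat).Pairwise
      (fun a b => ((gfPos flat a : Int)) < ((gfPos flat b : Int))) := by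
    refine (gfF_pairwise flat).imp ?_
    intro h
    simpa using h
  have hL : PySem.List.sorted (gfFirst flat).values (fun x => x) false
      = (gfF flat).map (fun a => (gfPos flat a : Int)) := gfOrder_eq flat
  have hLnd : ((gfF flat).map (fun a => (gfPos flat a : Int))).Nodup := by
    refine List.Pairwise.imp ?_ ((List.pairwise_map).mpr hgpw)
    intro a b h
    exact ne_of_lt h
  have hgp : ((gfPos flat p : Int)) ∈ (gfF flat).map (fun a => (gfPos flat a : Int)) :=
    List.mem_map_of_mem hpF
  rw [hL, gfFirst_getD flat p hp]
  unfold gfRank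
  rw [PySem.Dict.getD_eq_get?_getD, gfRank_get? _ 0 _ _ hLnd, if_pos hgp]
  have hidx : gfPos ((gfF flat).map (fun a => (gfPos flat a : Int))) ((gfPos flat p : Int))
      = gfPos (gfF flat) p :=
    gfPos_map_pairwise (fun a => (gfPos flat a : Int)) (gfF flat) p hgpw hpF
  rw [hidx]
  unfold gfIdx
  rw [index?_eq_of_mem _ _ hpF]
  simp

-- ===== VERDICT (by name: the statement is the Claim_ definition above) =====
theorem game_field_spec : Claim_equal_game_field := by
  intro img_field _
  unfold Spec_game_field game_field game_field_alt
  rw [gfLines_eq img_field []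
      (img_field.foldl (fun s line => line.foldl gfSAdd s) []) (List.prefix_refl _)]
  rw [seen_eq_gfF]
  apply List.map_congr_left
  intro line hline
  apply List.map_congr_left
  intro p hp
  have hpflat : p ∈ gfFlat img_field := by
    rw [gfFlat_eq, List.mem_flatten]
    exact ⟨line, hline, hp⟩
  exact (pixel_value_eq (gfFlat img_field) p hpflat).symm
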